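-- pv_equiv track=rewrite | github.com/kopunch88-maker/visa-kit | backend/app/templates_engine/context.py | _split_address_at_comma
-- ===== SOURCE A (Python) =====
-- def _split_address_at_comma(addr: str) -> tuple[str, str]:
--     """
--     Разбивает адрес на 2 строки по запятой ближайшей к середине.
--
--     После применения сокращений адрес становится короче, и разбивка
--     на 2 строки по запятой даёт хорошо отформатированную пару.
--     """
--     if len(addr) <= 50:
--         # Короткий — целиком в line1
--         return addr, ""
--
--     # Ищем запятую ближе к середине
--     target = len(addr) // 2
--     commas = [i for i, ch in enumerate(addr) if ch == ',']
--     if not commas: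
--         return addr, ""
--
--     # Ближайшая к target
--     best_comma = min(commas, key=lambda i: abs(i - target))
--     line1 = addr[: best_comma + 1].strip()
--     line2 = addr[best_comma + 1 :].strip()
--     return line1, line2
-- ===== SOURCE B (Python) =====
-- def _split_address_at_comma(addr: str) -> tuple[str, str]:
--     # Same result as A, but instead of collecting all comma indices and
--     # taking min(key=distance), search outward from the middle, left first.
--     if len(addr) <= 50:
--         return addr, ""
--     n = len(addr)
--     target = n // 2
--     for d in range(max(target, n - 1 - target) + 1):
--         for i in (target - d, target + d):
--             if 0 <= i < n and addr[i] == ',':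
--                 return addr[: i + 1].strip(), addr[i + 1 :].strip()
--     return addr, ""
-- ===== Notes on version B (the rewrite author's own statement) =====
-- stated objective: alternative
-- what changed: Replaces building the full list of comma indices plus min(key=|i-target|) with an outward expanding search from the middle (left candidate before right at each radius, which reproduces min's first-minimum tie-break), stopping at the first comma found.
import Mathlib
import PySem

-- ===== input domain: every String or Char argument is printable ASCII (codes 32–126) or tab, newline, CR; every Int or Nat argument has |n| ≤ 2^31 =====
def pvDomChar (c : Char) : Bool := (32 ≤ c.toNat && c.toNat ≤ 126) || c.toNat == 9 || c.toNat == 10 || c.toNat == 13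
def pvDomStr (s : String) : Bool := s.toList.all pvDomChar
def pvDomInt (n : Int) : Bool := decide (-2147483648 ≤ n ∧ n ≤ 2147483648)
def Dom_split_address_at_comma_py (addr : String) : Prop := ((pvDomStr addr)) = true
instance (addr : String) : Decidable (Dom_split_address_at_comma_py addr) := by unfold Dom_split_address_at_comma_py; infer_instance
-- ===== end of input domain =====

-- B replaces the comma-index list + min(key=|i-target|) of A by an outward search
-- from the middle (left candidate before right at each radius): alternative algorithm, same results.

-- ===== PORT A =====
def split_address_at_comma_py (addr : String) : String × String :=
  if PySem.Str.len addr ≤ 50 then (addr, "")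
  else
    let target : Int := PySem.Int.floordiv (PySem.Str.len addr) 2
    let commas : List Int :=
      ((PySem.List.enumerate addr.toList 0).filter (fun p => p.2 == ',')).map (·.1)
    if commas = [] then (addr, "")
    else
      match PySem.List.min? commas (fun i => |i - target|) with
      | none => (addr, "")   -- unreachable: commas ≠ []
      | some best =>
        (PySem.Str.strip (PySem.Str.slice addr none (some (best + 1))),
         PySem.Str.strip (PySem.Str.slice addr (some (best + 1)) none))

-- ===== PORT B =====
-- the inner 'for i in (target-d, target+d)' pair of checks, then d+1; fuel = remaining iterations of range
def altSearch (cs : List Char) (t : Nat) : Nat → Nat → Option Nat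
  | _, 0 => none
  | d, k + 1 =>
    if d ≤ t && (cs[t - d]? == some ',') then some (t - d)
    else if cs[t + d]? == some ',' then some (t + d)
    else altSearch cs t (d + 1) k

def split_address_at_comma_py_alt (addr : String) : String × String :=
  if addr.toList.length ≤ 50 then (addr, "")
  else
    let n := addr.toList.length
    let t := n / 2
    match altSearch addr.toList t 0 (max t (n - 1 - t) + 1) with
    | none => (addr, "")
    | some i =>
        (PySem.Str.strip (PySem.Str.slice addr none (some ((i : Int) + 1))),
         PySem.Str.strip (PySem.Str.slice addr (some ((i : Int) + 1)) none))

-- ===== PRECONDITION & SPEC =====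
def Spec_split_address_at_comma_py (addr : String) (out : String × String) : Prop := out = split_address_at_comma_py_alt addr
instance (addr : String) (out : String × String) : Decidable (Spec_split_address_at_comma_py addr out) := by unfold Spec_split_address_at_comma_py; infer_instance

-- ===== CLAIM (what is proved, stated in full; the proofs are below) =====
def Claim_equal_split_address_at_comma_py : Prop := ∀ (addr : String), Dom_split_address_at_comma_py addr → Spec_split_address_at_comma_py addr (split_address_at_comma_py addr)

-- ===== LEMMAS AND PROOFS =====

-- distance key on Nat indices
def keyN (t i : Nat) : Nat := ((i : Int) - (t : Int)).natAbs

-- the canonical answer: i is a comma position minimizing (distance, index) lexicographically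
def GoodN (cs : List Char) (t i : Nat) : Prop :=
  cs[i]? = some ',' ∧
  ∀ j : Nat, cs[j]? = some ',' → keyN t i < keyN t j ∨ (keyN t i = keyN t j ∧ i ≤ j)

-- B's search finds the canonical answer
theorem altSearch_some (cs : List Char) (t i : Nat) (hg : GoodN cs t i) :
    ∀ (k d : Nat), (∀ j : Nat, cs[j]? = some ',' → d ≤ keyN t j) → keyN t i < d + k →
    altSearch cs t d k = some i := by
  intro k
  induction k with
  | zero => intro d hd hlt; exact absurd (hd i hg.1) (by omega)
  | succ k ih =>
    intro d hd hlt
    rw [altSearch]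
    by_cases hL : d ≤ t ∧ cs[t - d]? = some ','
    · have hkey : keyN t (t - d) = d := by unfold keyN; omega
      have := hg.2 (t - d) hL.2
      have hdi := hd i hg.1
      have : i = t - d := by
        rcases this with h | ⟨h1, h2⟩
        · omega
        · unfold keyN at h1 hdi; omega
      simp [hL.1, hL.2, this]
    · have hLb : (decide (d ≤ t) && (cs[t - d]? == some ',')) = false := by
        rcases Decidable.em (d ≤ t) with h | h
        · have : ¬ cs[t - d]? = some ',' := fun hc => hL ⟨h, hc⟩
          simp [this]
        · simp [h]
      rw [hLb]
      simp only [Bool.false_eq_true, if_false]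
      by_cases hR : cs[t + d]? = some ','
      · have hkey : keyN t (t + d) = d := by unfold keyN; omega
        have := hg.2 (t + d) hR
        have hdi := hd i hg.1
        have hik : keyN t i = d := by
          rcases this with h | ⟨h1, h2⟩
          · omega
          · omega
        have : i = t - d ∧ d ≤ t ∨ i = t + d := by unfold keyN at hik; omega
        rcases this with ⟨h1, h2⟩ | h1
        · exact absurd ⟨h2, h1 ▸ hg.1⟩ hL
        · simp [hR, h1]
      · simp only [show (cs[t + d]? == some ',') = false by simp [hR], Bool.false_eq_true, if_false]
        apply ih (d + 1)
        · intro j hj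
          have hdj := hd j hj
          rcases Nat.lt_or_ge d (keyN t j) with h | h
          · omega
          · exfalso
            have hjd : keyN t j = d := by omega
            have hjn : j < cs.length := by
              rcases List.getElem?_eq_some_iff.mp hj with ⟨hh, _⟩; exact hh
            have : j = t - d ∧ d ≤ t ∨ j = t + d := by unfold keyN at hjd; omega
            rcases this with ⟨h1, h2⟩ | h1
            · exact hL ⟨h2, h1 ▸ hj⟩
            · exact hR (h1 ▸ hj)
        · omega

theorem altSearch_none (cs : List Char) (t : Nat) (h : ∀ j : Nat, cs[j]? ≠ some ',') :
    ∀ (k d : Nat), altSearch cs t d k = none := by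
  intro k
  induction k with
  | zero => intro d; rfl
  | succ k ih =>
    intro d
    rw [altSearch]
    simp [h (t - d), h (t + d), ih]

-- A's fold (min with first-minimum tie-break) on a strictly increasing list
theorem foldl_min_first (key : Int → Int) :
    ∀ (xs : List Int) (m0 : Int), xs.Pairwise (· < ·) → (∀ y ∈ xs, m0 < y) →
    ∃ m, List.foldl
        (fun acc x => match acc with
          | none => some x
          | some m => if key x < key m then some x else some m)
        (some m0) xs = some m
      ∧ m ∈ m0 :: xs ∧ (∀ y ∈ m0 :: xs, key m ≤ key y) ∧ (∀ y ∈ m0 :: xs, key y = key m → m ≤ y) := by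
  intro xs
  induction xs with
  | nil => intro m0 _ _; exact ⟨m0, rfl, by simp, by simp, by simp⟩
  | cons x rest ih =>
    intro m0 hp hlt
    have hx : m0 < x := hlt x (by simp)
    have hp' : rest.Pairwise (· < ·) := hp.of_cons
    have hxr : ∀ y ∈ rest, x < y := fun y hy => List.rel_of_pairwise_cons hp hy
    by_cases hkey : key x < key m0
    · obtain ⟨m, hfold, hmem, hmin, htie⟩ := ih x hp' hxr
      refine ⟨m, by simpa [hkey] using hfold, ?_, ?_, ?_⟩
      · rcases List.mem_cons.mp hmem with h | h
        · simp [h]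
        · exact List.mem_cons.mpr (Or.inr (List.mem_cons.mpr (Or.inr h)))
      · intro y hy
        rcases List.mem_cons.mp hy with h | hy'
        · rw [h]
          exact le_of_lt (lt_of_le_of_lt (hmin x (by simp)) hkey)
        · exact hmin y hy'
      · intro y hy hky
        rcases List.mem_cons.mp hy with h | hy'
        · rw [h] at hky
          have := hmin x (by simp)
          omega
        · exact htie y hy' hky
    · obtain ⟨m, hfold, hmem, hmin, htie⟩ := ih m0 hp' (fun y hy => lt_trans hx (hxr y hy))
      refine ⟨m, by simpa [hkey] using hfold, ?_, ?_, ?_⟩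
      · rcases List.mem_cons.mp hmem with h | h
        · simp [h]
        · exact List.mem_cons.mpr (Or.inr (List.mem_cons.mpr (Or.inr h)))
      · intro y hy
        rcases List.mem_cons.mp hy with h | hy'
        · rw [h]; exact hmin m0 (by simp)
        · rcases List.mem_cons.mp hy' with h2 | h3
          · rw [h2]
            exact le_trans (hmin m0 (by simp)) (le_of_not_gt hkey)
          · exact hmin y (List.mem_cons.mpr (Or.inr h3))
      · intro y hy hky
        rcases List.mem_cons.mp hy with h | hy'
        · rw [h] at hky ⊢
          exact htie m0 (by simp) hky
        · rcases List.mem_cons.mp hy' with h2 | h3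
          · rw [h2] at hky ⊢
            have hm0 : key m ≤ key m0 := hmin m0 (by simp)
            have heq : key m0 = key m := by omega
            have hmm0 : m ≤ m0 := htie m0 (by simp) heq
            omega
          · exact htie y (List.mem_cons.mpr (Or.inr h3)) hky

theorem min?_first (key : Int → Int) (xs : List Int) (hp : xs.Pairwise (· < ·)) (hne : xs ≠ []) :
    ∃ m, PySem.List.min? xs key = some m ∧ m ∈ xs ∧ (∀ y ∈ xs, key m ≤ key y) ∧
      (∀ y ∈ xs, key y = key m → m ≤ y) := by
  match xs, hp, hne with
  | x :: rest, hp, _ =>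
    obtain ⟨m, hfold, hmem, hmin, htie⟩ :=
      foldl_min_first key rest x hp.of_cons (fun y hy => List.rel_of_pairwise_cons hp hy)
    refine ⟨m, ?_, hmem, hmin, htie⟩
    have hrw : PySem.List.min? (x :: rest) key =
        List.foldl
          (fun acc x => match acc with
            | none => some x
            | some m => if key x < key m then some x else some m)
          (some x) rest := by
      unfold PySem.List.min?
      rw [List.foldl_cons]
      congr 1
      funext acc z
      cases acc <;> rfl
    rw [hrw]
    exact hfold

-- the comma-index list of A: membership and strict increasingness
theorem commas_mem (cs : List Char) (i : Int) :
    i ∈ ((PySem.List.enumerate cs 0).filter (fun p => p.2 == ',')).map (·.1) ↔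
      ∃ k : Nat, cs[k]? = some ',' ∧ i = (k : Int) := by
  simp only [List.mem_map, List.mem_filter, PySem.List.mem_enumerate_iff, beq_iff_eq]
  constructor
  · rintro ⟨p, ⟨⟨k, hk, rfl⟩, hc⟩, rfl⟩
    exact ⟨k, by rw [List.getElem?_eq_getElem hk]; exact congrArg some (by simpa using hc), by simp⟩
  · rintro ⟨k, hk, rfl⟩
    obtain ⟨hklt, hval⟩ := List.getElem?_eq_some_iff.mp hk
    exact ⟨(0 + (k : Int), cs[k]), ⟨⟨k, hklt, rfl⟩, hval⟩, by simp⟩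

theorem commas_pairwise (cs : List Char) :
    (((PySem.List.enumerate cs 0).filter (fun p => p.2 == ',')).map (·.1)).Pairwise (· < ·) := by
  exact List.Pairwise.map _ (fun a b h => h)
    ((PySem.List.pairwise_lt_enumerate cs 0).filter _)

-- a Good index is within radius max t (n-1-t)
theorem keyN_le (cs : List Char) (t i : Nat) (hi : i < cs.length) (ht : t = cs.length / 2) :
    keyN t i < max t (cs.length - 1 - t) + 1 := by
  unfold keyN; omega

theorem split_eq (addr : String) :
    split_address_at_comma_py addr = split_address_at_comma_py_alt addr := by
  unfold split_address_at_comma_py split_address_at_comma_py_alt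
  simp only [PySem.Str.len]
  set cs := addr.toList with hcs
  by_cases hlen : (cs.length : Int) ≤ 50
  · simp [hlen, show cs.length ≤ 50 by exact_mod_cast hlen]
  · have hlen' : ¬ cs.length ≤ 50 := by omega
    simp only [hlen, hlen', if_false]
    set n := cs.length with hn
    set t := n / 2 with ht
    have htarget : PySem.Int.floordiv (n : Int) 2 = (t : Int) := by
      rw [PySem.Int.floordiv_eq_ediv_of_pos (by norm_num)]
      omega
    set commas : List Int := ((PySem.List.enumerate cs 0).filter (fun p => p.2 == ',')).map (·.1) with hcommas
    by_cases hemp : commas = []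
    · -- no comma anywhere: both return (addr, "")
      have hnoc : ∀ j : Nat, cs[j]? ≠ some ',' := by
        intro j hj
        have : (j : Int) ∈ commas := (commas_mem cs (j : Int)).mpr ⟨j, hj, rfl⟩
        simp [hemp] at this
      rw [altSearch_none cs t hnoc]
      simp [hemp]
    · obtain ⟨m, hmin?, hmem, hmin, htie⟩ :=
        min?_first (fun i => |i - PySem.Int.floordiv (n : Int) 2|) commas (commas_pairwise cs) hemp
      obtain ⟨km, hkm, hmk⟩ := (commas_mem cs m).mp hmem
      have hgood : GoodN cs t km := by
        refine ⟨hkm, fun j hj => ?_⟩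
        have hjmem : (j : Int) ∈ commas := (commas_mem cs (j : Int)).mpr ⟨j, hj, rfl⟩
        have h1 := hmin _ hjmem
        have h2 := htie _ hjmem
        rw [htarget, hmk] at h1 h2
        rw [Int.abs_eq_natAbs, Int.abs_eq_natAbs] at h1
        unfold keyN
        rcases Nat.lt_or_ge (((km : Int) - (t : Int)).natAbs) (((j : Int) - (t : Int)).natAbs) with h | h
        · exact Or.inl h
        · refine Or.inr ⟨by omega, ?_⟩
          have habs : |(j : Int) - (t : Int)| = |(km : Int) - (t : Int)| := by
            rw [Int.abs_eq_natAbs, Int.abs_eq_natAbs]; omega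
          have := h2 habs
          omega
      obtain ⟨hkmn, -⟩ := List.getElem?_eq_some_iff.mp hkm
      rw [altSearch_some cs t km hgood (max t (n - 1 - t) + 1) 0
            (fun j hj => Nat.zero_le _) (by simpa using keyN_le cs t km hkmn ht)]
      simp only [hemp, if_false, hmin?, hmk]

-- ===== VERDICT (by name: the statement is the Claim_ definition above) =====
theorem split_address_at_comma_py_spec : Claim_equal_split_address_at_comma_py := by
  intro addr _
  unfold Spec_split_address_at_comma_py
  exact split_eq addr
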